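-- pv_equiv track=rewrite | github.com/janisrael/ai-analysis | ai_avatar_assistant/core/analytics_engine.py | calculate_work_span
-- ===== SOURCE A (Python) =====
-- from typing import Dict, List, Optional, Tuple
--
-- def calculate_work_span(hour_activity: Dict) -> Dict:
--     """Calculate the span of work hours"""
--     if not hour_activity:
--         return {"start": 9, "end": 17, "span": 8}
--
--     active_hours = [hour for hour, activity in hour_activity.items() if activity > 0]
--
--     if not active_hours:
--         return {"start": 9, "end": 17, "span": 8}
--
--     start_hour = min(active_hours)
--     end_hour = max(active_hours)
--     span = end_hour - start_hour + 1
--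
--     return {"start": start_hour, "end": end_hour, "span": span}
-- ===== SOURCE B (Python) =====
-- def calculate_work_span(hour_activity):
--     """Single pass over the items: track running lo/hi of active hours."""
--     found = False
--     lo = 0
--     hi = 0
--     for hour, activity in hour_activity.items():
--         if activity > 0:
--             if not found:
--                 lo = hour
--                 hi = hour
--                 found = True
--             else:
--                 lo = min(lo, hour)
--                 hi = max(hi, hour)
--     if not found:
--         return {"start": 9, "end": 17, "span": 8}
--     return {"start": lo, "end": hi, "span": hi - lo + 1}
-- ===== Notes on version B (the rewrite author's own statement) =====
-- stated objective: alternative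
-- what changed: Replaces the filter-comprehension plus separate min() and max() passes with a single fold over the items maintaining a found flag and running lo/hi; the no-active default falls out of the flag, so the empty-dict guard disappears.
import Mathlib
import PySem

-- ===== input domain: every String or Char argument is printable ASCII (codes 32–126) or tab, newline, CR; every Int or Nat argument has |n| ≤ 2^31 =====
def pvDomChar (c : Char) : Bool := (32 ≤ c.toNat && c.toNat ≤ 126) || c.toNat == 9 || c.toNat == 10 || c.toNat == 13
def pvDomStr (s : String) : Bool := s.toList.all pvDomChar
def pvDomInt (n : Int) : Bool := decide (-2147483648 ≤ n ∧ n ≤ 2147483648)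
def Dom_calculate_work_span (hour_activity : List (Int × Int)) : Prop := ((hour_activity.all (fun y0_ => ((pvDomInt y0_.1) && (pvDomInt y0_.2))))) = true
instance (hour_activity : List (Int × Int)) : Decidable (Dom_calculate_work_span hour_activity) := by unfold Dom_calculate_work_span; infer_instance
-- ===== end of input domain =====

-- B replaces A's filter / min / max passes by one fold with a running (lo, hi) state; same result, alternative decomposition.


-- ===== PORT A =====
def calculate_work_span (hour_activity : List (Int × Int)) : List (String × Int) :=
  if hour_activity = [] then [("start", 9), ("end", 17), ("span", 8)]
  else
    let active := (hour_activity.filter (fun p => p.2 > 0)).map Prod.fst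
    if active = [] then [("start", 9), ("end", 17), ("span", 8)]
    else
      match PySem.List.min? active (fun y => y), PySem.List.max? active (fun y => y) with
      | some s, some e => [("start", s), ("end", e), ("span", e - s + 1)]
      | _, _ => []  -- unreachable: active is nonempty here

-- ===== PORT B =====
-- one pass: Option (lo, hi) plays the role of Source B's found/lo/hi state
def cwsStep (acc : Option (Int × Int)) (p : Int × Int) : Option (Int × Int) :=
  if p.2 > 0 then
    match acc with
    | none => some (p.1, p.1)
    | some (lo, hi) => some (min lo p.1, max hi p.1)
  else acc

def calculate_work_span_alt (hour_activity : List (Int × Int)) : List (String × Int) :=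
  match hour_activity.foldl cwsStep none with
  | none => [("start", 9), ("end", 17), ("span", 8)]
  | some (lo, hi) => [("start", lo), ("end", hi), ("span", hi - lo + 1)]

-- ===== PRECONDITION & SPEC =====
def Spec_calculate_work_span (hour_activity : List (Int × Int)) (out : List (String × Int)) : Prop := out = calculate_work_span_alt hour_activity
instance (hour_activity : List (Int × Int)) (out : List (String × Int)) : Decidable (Spec_calculate_work_span hour_activity out) := by unfold Spec_calculate_work_span; infer_instance

-- ===== CLAIM (what is proved, stated in full; the proofs are below) =====
def Claim_equal_calculate_work_span : Prop := ∀ (hour_activity : List (Int × Int)), Dom_calculate_work_span hour_activity → Spec_calculate_work_span hour_activity (calculate_work_span hour_activity)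

-- ===== LEMMAS AND PROOFS =====

-- once the state is `some (lo, hi)`, the fold keeps the running min/max of the active hours
theorem cws_fold_some (l : List (Int × Int)) (lo hi : Int) :
    l.foldl cwsStep (some (lo, hi)) =
      some (((l.filter (fun p => p.2 > 0)).map Prod.fst).foldl min lo,
            ((l.filter (fun p => p.2 > 0)).map Prod.fst).foldl max hi) := by
  induction l generalizing lo hi with
  | nil => simp
  | cons p t ih =>
    by_cases hp : p.2 > 0 <;>
      simp [cwsStep, hp, ih]

-- from the empty state, the fold computes min/max of the nonempty active list (or none)
theorem cws_fold_none (l : List (Int × Int)) :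
    l.foldl cwsStep none =
      match (l.filter (fun p => p.2 > 0)).map Prod.fst with
      | [] => none
      | x :: t => some (t.foldl min x, t.foldl max x) := by
  induction l with
  | nil => simp
  | cons p t ih =>
    by_cases hp : p.2 > 0
    · simp [cwsStep, hp, cws_fold_some]
    · simp [cwsStep, hp, ih]

-- ===== VERDICT (by name: the statement is the Claim_ definition above) =====
theorem calculate_work_span_spec : Claim_equal_calculate_work_span := by
  intro ha _
  unfold Spec_calculate_work_span calculate_work_span calculate_work_span_alt
  rw [cws_fold_none]
  by_cases h0 : ha = []
  · subst h0; simp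
  · simp only [h0, if_false]
    cases hact : (ha.filter (fun p => p.2 > 0)).map Prod.fst with
    | nil => simp
    | cons x t =>
      simp [PySem.List.min?_id_cons, PySem.List.max?_id_cons]
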